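-- pv_equiv track=rewrite | github.com/YQuark/CDU_GYM_RESERVE | main_request.py | pick_card_by_keywords
-- ===== SOURCE A (Python) =====
-- def pick_card_by_keywords(cards: list[dict], keywords: list[str]) -> dict | None:
--     """按关键字挑卡；匹配不到就返回第一张"""
--     if not cards:
--         return None
--     def score(c):
--         nm = c.get("name", "")
--         for i, kw in enumerate(keywords):
--             if kw in nm:
--                 return i
--         return 999
--     cards_sorted = sorted(cards, key=score)
--     return cards_sorted[0]
-- ===== SOURCE B (Python) =====
-- def pick_card_by_keywords(cards: list[dict], keywords: list[str]) -> dict | None: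
--     """按关键字挑卡；匹配不到就返回第一张。
--     Priority-ordered search: first keyword (in order) that matches any card wins,
--     and the first matching card is returned; no per-card scoring, no sort."""
--     if not cards:
--         return None
--     for kw in keywords:
--         for c in cards:
--             if kw in c.get("name", ""):
--                 return c
--     return cards[0]
-- ===== Notes on version B (the rewrite author's own statement) =====
-- stated objective: simpler
-- what changed: Replaced 'compute a match-index score for every card and stably sort by it, then take the head' with a priority-ordered search: loop over keywords in order, return the first card whose name contains the keyword, falling back to cards[0]; no scoring function and no sort.
import Mathlib
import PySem

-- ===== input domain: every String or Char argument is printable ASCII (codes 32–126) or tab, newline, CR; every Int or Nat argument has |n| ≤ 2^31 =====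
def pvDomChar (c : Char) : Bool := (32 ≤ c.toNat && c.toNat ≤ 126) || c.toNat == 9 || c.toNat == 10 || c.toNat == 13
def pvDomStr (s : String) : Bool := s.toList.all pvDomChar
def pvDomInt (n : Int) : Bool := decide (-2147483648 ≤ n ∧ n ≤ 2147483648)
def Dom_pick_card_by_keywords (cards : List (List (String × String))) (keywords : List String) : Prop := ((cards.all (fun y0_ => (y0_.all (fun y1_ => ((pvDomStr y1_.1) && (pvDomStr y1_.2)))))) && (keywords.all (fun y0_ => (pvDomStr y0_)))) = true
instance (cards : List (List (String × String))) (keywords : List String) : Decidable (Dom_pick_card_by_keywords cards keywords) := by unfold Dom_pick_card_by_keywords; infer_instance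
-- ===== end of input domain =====

-- B replaces A's score-every-card-then-stable-sort with a priority-ordered search over the
-- keywords that returns the first matching card (objective: simpler, no scoring and no sort).

-- ===== PORT A =====
-- c.get("name", "")
def pvNm (c : List (String × String)) : String := PySem.Dict.getD (PySem.Dict.mk c) "name" ""

-- the 'for i, kw in enumerate(keywords)' loop of score, carrying the running index i
def pvScoreLoop (nm : String) (i : Nat) : List String → Int
  | [] => 999
  | kw :: rest => if PySem.Str.isIn kw nm then (i : Int) else pvScoreLoop nm (i + 1) rest

-- A's local 'score'
def pvScore (keywords : List String) (c : List (String × String)) : Int :=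
  pvScoreLoop (pvNm c) 0 keywords

def pick_card_by_keywords (cards : List (List (String × String))) (keywords : List String) : Option (List (String × String)) :=
  if cards = [] then none
  else (PySem.List.sorted cards (fun c => pvScore keywords c) false).head?

-- ===== PORT B =====
-- B's inner loop: first card whose name contains kw
def pvFindCard (kw : String) : List (List (String × String)) → Option (List (String × String))
  | [] => none
  | c :: rest => if PySem.Str.isIn kw (pvNm c) then some c else pvFindCard kw rest

-- B's outer loop over the keywords, in priority order
def pvSearch (cards : List (List (String × String))) : List String → Option (List (String × String))
  | [] => none
  | kw :: rest =>
    match pvFindCard kw cards with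
    | some c => some c
    | none => pvSearch cards rest

def pick_card_by_keywords_alt (cards : List (List (String × String))) (keywords : List String) : Option (List (String × String)) :=
  match cards with
  | [] => none
  | c0 :: _ =>
    match pvSearch cards keywords with
    | some c => some c
    | none => some c0

-- ===== PRECONDITION & SPEC =====
-- Pre_ excludes keyword lists with 1000 or more entries: there A's fixed no-match sentinel
-- score 999 collides with genuine match indices (keywords at index ≥ 999 rank no better than,
-- or worse than, no match at all), a corner of the unspecified 'many keywords' regime where
-- A's and B's choices are both accidental; B does the natural priority search there.
def Pre_pick_card_by_keywords (cards : List (List (String × String))) (keywords : List String) : Prop :=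
  keywords.length ≤ 999
instance (cards : List (List (String × String))) (keywords : List String) : Decidable (Pre_pick_card_by_keywords cards keywords) := by unfold Pre_pick_card_by_keywords; infer_instance

def pvWitness_pick_card_by_keywords : (List (List (String × String))) × List String :=
  ([[("name", "alpha")], [("name", "beta")]], ["beta", "alpha"])

def Spec_pick_card_by_keywords (cards : List (List (String × String))) (keywords : List String) (out : Option (List (String × String))) : Prop := out = pick_card_by_keywords_alt cards keywords
instance (cards : List (List (String × String))) (keywords : List String) (out : Option (List (String × String))) : Decidable (Spec_pick_card_by_keywords cards keywords out) := by unfold Spec_pick_card_by_keywords; infer_instance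

-- ===== CLAIM (what is proved, stated in full; the proofs are below) =====
def Claim_equal_pick_card_by_keywords : Prop := ∀ (cards : List (List (String × String))) (keywords : List String), Dom_pick_card_by_keywords cards keywords → Pre_pick_card_by_keywords cards keywords → Spec_pick_card_by_keywords cards keywords (pick_card_by_keywords cards keywords)

-- ===== LEMMAS AND PROOFS =====

-- the strict-first-argmin fold that the head of A's stable insertion sort computes
def pvSel (f : List (String × String) → Int) (m : List (String × String)) (l : List (List (String × String))) : List (String × String) :=
  l.foldl (fun m x => if f x < f m then x else m) m

theorem head_foldl_insertBy (f : List (String × String) → Int) :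
    ∀ (l : List (List (String × String))) (m : List (String × String)) (t : List (List (String × String))),
    ∃ t', l.foldl (fun acc x => PySem.List.insertBy (fun a b => decide (f a < f b)) x acc) (m :: t)
          = pvSel f m l :: t' := by
  intro l
  induction l with
  | nil => intro m t; exact ⟨t, rfl⟩
  | cons x rest ih =>
    intro m t
    simp only [List.foldl_cons, PySem.List.insertBy, pvSel]
    by_cases h : f x < f m
    · simpa [h, pvSel] using ih x (m :: t)
    · simpa [h, pvSel] using ih m (PySem.List.insertBy (fun a b => decide (f a < f b)) x t)

theorem pvSel_keep (f : List (String × String) → Int) :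
    ∀ (l : List (List (String × String))) (m : List (String × String)),
    (∀ y ∈ l, ¬ f y < f m) → pvSel f m l = m := by
  intro l
  induction l with
  | nil => intro m _; rfl
  | cons x rest ih =>
    intro m h
    have hx : ¬ f x < f m := h x (by simp)
    simp only [pvSel, List.foldl_cons, if_neg hx]
    exact ih m (fun y hy => h y (by simp [hy]))

theorem pvSel_first (f : List (String × String) → Int) :
    ∀ (pre : List (List (String × String))) (m c : List (String × String)) (suf : List (List (String × String))),
    (∀ y ∈ pre, f c < f y) → f c < f m → (∀ y ∈ suf, f c ≤ f y) →
    pvSel f m (pre ++ c :: suf) = c := by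
  intro pre
  induction pre with
  | nil =>
    intro m c suf _ hm hsuf
    simp only [List.nil_append, pvSel, List.foldl_cons, if_pos hm]
    exact pvSel_keep f suf c (fun y hy => by have := hsuf y hy; omega)
  | cons y pre' ih =>
    intro m c suf hpre hm hsuf
    have hy : f c < f y := hpre y (by simp)
    simp only [List.cons_append, pvSel, List.foldl_cons]
    by_cases h : f y < f m
    · simp only [if_pos h]
      exact ih y c suf (fun z hz => hpre z (by simp [hz])) hy hsuf
    · simp only [if_neg h]
      exact ih m c suf (fun z hz => hpre z (by simp [hz])) hm hsuf

theorem scoreLoop_all_none (nm : String) :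
    ∀ (l : List String) (i : Nat), (∀ kw ∈ l, PySem.Str.isIn kw nm = false) →
    pvScoreLoop nm i l = 999 := by
  intro l
  induction l with
  | nil => intro i _; rfl
  | cons kw rest ih =>
    intro i h
    have : PySem.Str.isIn kw nm = false := h kw (by simp)
    simp only [pvScoreLoop, this]
    simp only [Bool.false_eq_true, if_false]
    exact ih (i + 1) (fun k hk => h k (by simp [hk]))

theorem scoreLoop_skip (nm : String) :
    ∀ (k1 : List String) (l : List String) (i : Nat), (∀ kw ∈ k1, PySem.Str.isIn kw nm = false) →
    pvScoreLoop nm i (k1 ++ l) = pvScoreLoop nm (i + k1.length) l := by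
  intro k1
  induction k1 with
  | nil => intro l i _; simp
  | cons kw rest ih =>
    intro l i h
    have hkw : PySem.Str.isIn kw nm = false := h kw (by simp)
    simp only [List.cons_append, pvScoreLoop, hkw, Bool.false_eq_true, if_false]
    rw [ih l (i + 1) (fun k hk => h k (by simp [hk]))]
    congr 1
    simp
    omega

theorem scoreLoop_lb (nm : String) :
    ∀ (l : List String) (i : Nat), i + l.length ≤ 999 →
    (i : Int) ≤ pvScoreLoop nm i l := by
  intro l
  induction l with
  | nil => intro i h; simp only [pvScoreLoop]; omega
  | cons kw rest ih =>
    intro i h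
    simp only [pvScoreLoop]
    by_cases hkw : PySem.Str.isIn kw nm = true
    · rw [if_pos hkw]
    · rw [if_neg hkw]
      have := ih (i + 1) (by simp at h; omega)
      omega

theorem findCard_none (kw : String) :
    ∀ (cards : List (List (String × String))), pvFindCard kw cards = none →
    ∀ c ∈ cards, PySem.Str.isIn kw (pvNm c) = false := by
  intro cards
  induction cards with
  | nil => intro _ c hc; simp at hc
  | cons x rest ih =>
    intro h c hc
    simp only [pvFindCard] at h
    by_cases hx : PySem.Str.isIn kw (pvNm x) = true
    · rw [if_pos hx] at h; cases h
    · rw [if_neg hx] at h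
      rcases List.mem_cons.mp hc with rfl | hc'
      · simpa using hx
      · exact ih h c hc'

theorem findCard_some (kw : String) :
    ∀ (cards : List (List (String × String))) (c : List (String × String)),
    pvFindCard kw cards = some c →
    ∃ pre suf, cards = pre ++ c :: suf ∧ PySem.Str.isIn kw (pvNm c) = true ∧
      ∀ y ∈ pre, PySem.Str.isIn kw (pvNm y) = false := by
  intro cards
  induction cards with
  | nil => intro c h; simp [pvFindCard] at h
  | cons x rest ih =>
    intro c h
    simp only [pvFindCard] at h
    by_cases hx : PySem.Str.isIn kw (pvNm x) = true
    · rw [if_pos hx] at h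
      cases h
      exact ⟨[], rest, by simp, hx, by simp⟩
    · rw [if_neg hx] at h
      obtain ⟨pre, suf, hcards, hc, hpre⟩ := ih c h
      refine ⟨x :: pre, suf, by simp [hcards], hc, ?_⟩
      intro y hy
      rcases List.mem_cons.mp hy with rfl | hy'
      · simpa using hx
      · exact hpre y hy'

theorem search_none (cards : List (List (String × String))) :
    ∀ (kws : List String), pvSearch cards kws = none →
    ∀ kw ∈ kws, pvFindCard kw cards = none := by
  intro kws
  induction kws with
  | nil => intro _ kw h; simp at h
  | cons k rest ih =>
    intro h kw hkw
    simp only [pvSearch] at h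
    cases hfc : pvFindCard k cards with
    | some c => simp [hfc] at h
    | none =>
      simp only [hfc] at h
      rcases List.mem_cons.mp hkw with rfl | h'
      · exact hfc
      · exact ih h kw h'

theorem search_some (cards : List (List (String × String))) :
    ∀ (kws : List String) (c : List (String × String)), pvSearch cards kws = some c →
    ∃ k1 kw k2, kws = k1 ++ kw :: k2 ∧ pvFindCard kw cards = some c ∧
      ∀ kw' ∈ k1, pvFindCard kw' cards = none := by
  intro kws
  induction kws with
  | nil => intro c h; simp [pvSearch] at h
  | cons k rest ih =>
    intro c h
    simp only [pvSearch] at h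
    cases hfc : pvFindCard k cards with
    | some c' =>
      simp only [hfc, Option.some.injEq] at h
      subst h
      exact ⟨[], k, rest, by simp, hfc, by simp⟩
    | none =>
      simp only [hfc] at h
      obtain ⟨k1, kw, k2, hkws, hc, hk1⟩ := ih c h
      refine ⟨k :: k1, kw, k2, by simp [hkws], hc, ?_⟩
      intro kw' hkw'
      rcases List.mem_cons.mp hkw' with rfl | h'
      · exact hfc
      · exact hk1 kw' h'

-- f y for a card y that does not match any keyword of k1, expressed on the tail
theorem score_decomp (keywords k1 : List String) (kw : String) (k2 : List String)
    (hkws : keywords = k1 ++ kw :: k2) (y : List (String × String))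
    (hy : ∀ kw' ∈ k1, PySem.Str.isIn kw' (pvNm y) = false) :
    pvScore keywords y = pvScoreLoop (pvNm y) k1.length (kw :: k2) := by
  subst hkws
  unfold pvScore
  rw [scoreLoop_skip (pvNm y) k1 (kw :: k2) 0 hy]
  simp

theorem pick_card_head (cards : List (List (String × String))) (keywords : List String)
    (c0 : List (String × String)) (rest : List (List (String × String)))
    (hcards : cards = c0 :: rest) :
    pick_card_by_keywords cards keywords = some (pvSel (pvScore keywords) c0 rest) := by
  subst hcards
  unfold pick_card_by_keywords
  rw [if_neg (by simp)]
  rw [PySem.List.sorted_eq_foldl_insertBy]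
  simp only [List.foldl_cons]
  have h1 : PySem.List.insertBy
      (fun a b => decide (pvScore keywords a < pvScore keywords b)) c0 ([] : List (List (String × String))) = [c0] := rfl
  rw [h1]
  obtain ⟨t', ht'⟩ := head_foldl_insertBy (pvScore keywords) rest c0 []
  rw [ht']
  rfl

-- ===== VERDICT (by name: the statement is the Claim_ definition above) =====
theorem pick_card_by_keywords_spec : Claim_equal_pick_card_by_keywords := by
  intro cards keywords _ hpre
  unfold Spec_pick_card_by_keywords
  unfold Pre_pick_card_by_keywords at hpre
  cases cards with
  | nil => rfl
  | cons c0 rest =>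
    rw [pick_card_head (c0 :: rest) keywords c0 rest rfl]
    unfold pick_card_by_keywords_alt
    cases hs : pvSearch (c0 :: rest) keywords with
    | none =>
      -- no keyword matches any card: every score is 999, the fold keeps c0
      have hall := search_none (c0 :: rest) keywords hs
      have hsc : ∀ y ∈ (c0 :: rest), pvScore keywords y = 999 := by
        intro y hy
        exact scoreLoop_all_none (pvNm y) keywords 0
          (fun kw hkw => findCard_none kw (c0 :: rest) (hall kw hkw) y hy)
      rw [pvSel_keep (pvScore keywords) rest c0 (fun y hy => by
        rw [hsc y (by simp [hy]), hsc c0 (by simp)]; omega)]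
    | some c =>
      obtain ⟨k1, kw, k2, hkws, hfc, hk1⟩ := search_some (c0 :: rest) keywords c hs
      obtain ⟨pre, suf, hdec, hmc, hpre'⟩ := findCard_some kw (c0 :: rest) c hfc
      have hlen : k1.length + (kw :: k2).length ≤ 999 := by
        rw [hkws] at hpre; simp at hpre ⊢; omega
      -- score of c is k1.length
      have hcmem : c ∈ (c0 :: rest) := by rw [hdec]; simp
      have hscc : pvScore keywords c = (k1.length : Int) := by
        rw [score_decomp keywords k1 kw k2 hkws c
          (fun kw' hkw' => findCard_none kw' (c0 :: rest) (hk1 kw' hkw') c hcmem)]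
        simp only [pvScoreLoop]
        rw [if_pos hmc]
      -- every card scores at least k1.length
      have hge : ∀ y ∈ (c0 :: rest), (k1.length : Int) ≤ pvScore keywords y := by
        intro y hy
        rw [score_decomp keywords k1 kw k2 hkws y
          (fun kw' hkw' => findCard_none kw' (c0 :: rest) (hk1 kw' hkw') y hy)]
        exact scoreLoop_lb (pvNm y) (kw :: k2) k1.length hlen
      -- every card before c scores strictly more
      have hgt : ∀ y ∈ pre, pvScore keywords c < pvScore keywords y := by
        intro y hy
        have hymem : y ∈ (c0 :: rest) := by rw [hdec]; exact List.mem_append.mpr (Or.inl hy)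
        rw [hscc, score_decomp keywords k1 kw k2 hkws y
          (fun kw' hkw' => findCard_none kw' (c0 :: rest) (hk1 kw' hkw') y hymem)]
        simp only [pvScoreLoop]
        rw [if_neg (by rw [hpre' y hy]; simp)]
        have := scoreLoop_lb (pvNm y) k2 (k1.length + 1) (by simp at hlen; omega)
        push_cast at this ⊢
        omega
      have hle : ∀ y ∈ suf, pvScore keywords c ≤ pvScore keywords y := by
        intro y hy
        have hymem : y ∈ (c0 :: rest) := by rw [hdec]; simp [hy]
        rw [hscc]
        exact hge y hymem
      -- assemble: pvSel over c0 :: rest picks c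
      cases pre with
      | nil =>
        simp only [List.nil_append, List.cons.injEq] at hdec
        obtain ⟨rfl, rfl⟩ := hdec
        rw [pvSel_keep (pvScore keywords) rest c0 (fun y hy => by have := hle y hy; omega)]
      | cons p0 pre' =>
        simp only [List.cons_append, List.cons.injEq] at hdec
        obtain ⟨rfl, hrest⟩ := hdec
        rw [hrest]
        exact congrArg some (pvSel_first (pvScore keywords) pre' c0 c suf
          (fun y hy => hgt y (by simp [hy])) (hgt c0 (by simp)) hle)
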